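-- pv_equiv track=rewrite | github.com/rpSebastian/texas_poker | original_server/eval/lbr.py | get_current_round_bet
-- ===== SOURCE A (Python) =====
-- def get_current_round_bet(position, action_history):
--     actions = action_history[-1].copy()
--     if len(action_history) == 1:
--         actions.insert(0, '1:r100')
--         actions.insert(0, '0:r50')
--     pmax = None
--     for action in reversed(actions):
--         p, a = action.split(':')
--         if int(p) == position and a[0] == 'r' and pmax is None:
--             return int(a[1:])
--         if int(p) == position and a[0] == 'c' and pmax is None:
--             pmax = 0
--         if pmax is not None and a[0]=='r':
--             pmax = max(pmax, int(a[1:]))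
--     if pmax == None:
--         pmax = 0
--     return pmax
-- ===== SOURCE B (Python) =====
-- def get_current_round_bet(position, action_history):
--     # Single forward pass: keep the max raise seen so far (m) and the answer
--     # implied by the player's latest 'r'/'c' action; folds ignored.
--     actions = list(action_history[-1])
--     if len(action_history) == 1:
--         actions = ['0:r50', '1:r100'] + actions
--     ans = 0
--     m = 0
--     for act in actions:
--         p, a = act.split(':')
--         if int(p) == position:
--             if a[0] == 'r':
--                 ans = int(a[1:])
--             elif a[0] == 'c':
--                 ans = m
--         if a[0] == 'r':
--             m = max(m, int(a[1:]))
--     return ans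
-- ===== Notes on version B (the rewrite author's own statement) =====
-- stated objective: simpler
-- what changed: A scans the actions in reverse with an early return and an Option accumulator; B is a single forward fold keeping two plain ints (the running max raise and the answer implied by the player's latest r/c action).
-- outside the precondition, e.g. on get_current_round_bet(0, [['x', '0:r5']]): A returns 5, B raises ValueError
import Mathlib
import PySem

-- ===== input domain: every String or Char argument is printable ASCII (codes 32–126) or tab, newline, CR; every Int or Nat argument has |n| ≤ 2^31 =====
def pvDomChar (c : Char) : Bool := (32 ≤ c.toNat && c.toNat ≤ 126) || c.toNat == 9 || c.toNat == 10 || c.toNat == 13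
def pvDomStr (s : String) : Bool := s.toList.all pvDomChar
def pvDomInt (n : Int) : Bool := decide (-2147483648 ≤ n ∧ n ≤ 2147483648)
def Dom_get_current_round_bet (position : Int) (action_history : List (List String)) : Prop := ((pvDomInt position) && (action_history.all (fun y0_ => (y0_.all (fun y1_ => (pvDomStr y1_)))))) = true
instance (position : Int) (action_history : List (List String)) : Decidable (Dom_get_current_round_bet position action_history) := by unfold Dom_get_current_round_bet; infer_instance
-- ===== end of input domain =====

-- B replaces A's reversed early-return scan by a single forward fold over the actions; objective: simpler.


-- shared action parsing, used identically by both Pythons: `p, a = act.split(':')`, `int(p)`, `a[0]`, `a[1:]`.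
-- none exactly where Python raises (≠ 2 parts, non-int player, empty a); those inputs are outside Pre_.
def pvParse (act : String) : Option (Int × Char × String) :=
  match (PySem.Str.split? act ":").getD [] with
  | [p, a] =>
    match PySem.Int.ofStr? p, a.toList with
    | some n, c :: rest => some (n, c, String.ofList rest)
    | _, _ => none
  | _ => none

-- int(a[1:]); the .getD 0 default is only reachable outside Pre_.
def pvAmt (s : String) : Int := (PySem.Int.ofStr? s).getD 0

-- ===== PORT A =====
-- the `for action in reversed(actions)` loop of A, with its early return and Option pmax
def pvLoopA (position : Int) (acts : List String) (pmax : Option Int) : Int :=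
  match acts with
  | [] => pmax.getD 0
  | act :: rest =>
    match pvParse act with
    | none => pvLoopA position rest pmax   -- unreachable under Pre_ (Python raises)
    | some (p, c, s) =>
      if p = position ∧ c = 'r' ∧ pmax = none then pvAmt s
      else
        let pmax1 := if p = position ∧ c = 'c' ∧ pmax = none then some (0 : Int) else pmax
        let pmax2 := match pmax1 with
          | some m => if c = 'r' then some (max m (pvAmt s)) else some m
          | none => none
        pvLoopA position rest pmax2

def get_current_round_bet (position : Int) (action_history : List (List String)) : Int :=
  match PySem.List.pyGet? action_history (-1) with
  | none => 0   -- unreachable under Pre_ (Python raises IndexError on [])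
  | some last =>
    let actions := if action_history.length = 1 then "0:r50" :: "1:r100" :: last else last
    pvLoopA position actions.reverse none

-- ===== PORT B =====
-- B's loop body: state (ans, m)
def pvStepB (position : Int) (s : Int × Int) (act : String) : Int × Int :=
  match pvParse act with
  | none => s   -- unreachable under Pre_ (Python raises)
  | some (p, c, amtStr) =>
    let ans := if p = position then (if c = 'r' then pvAmt amtStr else if c = 'c' then s.2 else s.1) else s.1
    let m := if c = 'r' then max s.2 (pvAmt amtStr) else s.2
    (ans, m)

def get_current_round_bet_alt (position : Int) (action_history : List (List String)) : Int :=
  match PySem.List.pyGet? action_history (-1) with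
  | none => 0   -- unreachable under Pre_
  | some last =>
    let actions := if action_history.length = 1 then "0:r50" :: "1:r100" :: last else last
    (actions.foldl (pvStepB position) (0, 0)).1

-- ===== PRECONDITION & SPEC =====
def pvWF (act : String) : Bool :=
  match pvParse act with
  | some (_, c, s) => !(c == 'r') || (PySem.Int.ofStr? s).isSome
  | none => false

-- Pre_ excludes histories whose current betting round contains a malformed action string (not exactly one ':',
-- non-integer player, empty action code, or an 'r' action with a non-integer amount): Python raises on such an
-- action unless the scan happens to return before reaching it, so this is slightly narrower than A's exact domain.
def Pre_get_current_round_bet (position : Int) (action_history : List (List String)) : Prop :=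
  action_history ≠ [] ∧ ∀ act ∈ action_history.getLastD [], pvWF act = true
instance (position : Int) (action_history : List (List String)) : Decidable (Pre_get_current_round_bet position action_history) := by unfold Pre_get_current_round_bet; infer_instance

def pvWitness_get_current_round_bet : Int × List (List String) :=
  (0, [["0:r50", "1:r100"], ["1:r200", "0:c", "1:f"]])

def Spec_get_current_round_bet (position : Int) (action_history : List (List String)) (out : Int) : Prop := out = get_current_round_bet_alt position action_history
instance (position : Int) (action_history : List (List String)) (out : Int) : Decidable (Spec_get_current_round_bet position action_history out) := by unfold Spec_get_current_round_bet; infer_instance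

-- ===== CLAIM (what is proved, stated in full; the proofs are below) =====
def Claim_equal_get_current_round_bet : Prop := ∀ (position : Int) (action_history : List (List String)), Dom_get_current_round_bet position action_history → Pre_get_current_round_bet position action_history → Spec_get_current_round_bet position action_history (get_current_round_bet position action_history)

-- ===== LEMMAS AND PROOFS =====

-- the running-max step both loops reduce to once the player's call has been found
def pvStepM (m : Int) (act : String) : Int :=
  match pvParse act with
  | some (_, c, s) => if c = 'r' then max m (pvAmt s) else m
  | none => m

theorem pvLoopA_some (position : Int) (acts : List String) (m : Int) :
    pvLoopA position acts (some m) = acts.foldl pvStepM m := by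
  induction acts generalizing m with
  | nil => simp [pvLoopA]
  | cons act rest ih =>
    simp only [pvLoopA, List.foldl_cons, pvStepM]
    cases hp : pvParse act with
    | none => exact ih m
    | some t =>
      obtain ⟨p, c, s⟩ := t
      simp only
      rw [if_neg (by simp)]
      simp only [if_neg (by simp : ¬(p = position ∧ c = 'c' ∧ some m = none))]
      by_cases hc : c = 'r' <;> simp [hc, ih]

theorem pvStepM_comm (m : Int) (x y : String) :
    pvStepM (pvStepM m x) y = pvStepM (pvStepM m y) x := by
  unfold pvStepM
  cases pvParse x with
  | none => rfl
  | some t =>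
    obtain ⟨p, c, s⟩ := t
    cases pvParse y with
    | none => rfl
    | some t' =>
      obtain ⟨p', c', s'⟩ := t'
      simp only
      split_ifs <;> simp [max_comm, max_left_comm]

theorem foldl_pvStepM_out (acts : List String) (m : Int) (x : String) :
    acts.foldl pvStepM (pvStepM m x) = pvStepM (acts.foldl pvStepM m) x := by
  induction acts generalizing m with
  | nil => rfl
  | cons a rest ih => simp only [List.foldl_cons, pvStepM_comm m x a, ih]

theorem foldl_pvStepM_reverse (acts : List String) (m : Int) :
    acts.reverse.foldl pvStepM m = acts.foldl pvStepM m := by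
  induction acts generalizing m with
  | nil => rfl
  | cons a rest ih =>
    simp only [List.reverse_cons, List.foldl_append, List.foldl_cons, List.foldl_nil, ih,
      ← foldl_pvStepM_out]

theorem foldl_pvStepB_snd (position : Int) (acts : List String) (a m : Int) :
    (acts.foldl (pvStepB position) (a, m)).2 = acts.foldl pvStepM m := by
  induction acts generalizing a m with
  | nil => rfl
  | cons act rest ih =>
    simp only [List.foldl_cons, pvStepB, pvStepM]
    cases hp : pvParse act with
    | none => exact ih a m
    | some t =>
      obtain ⟨p, c, s⟩ := t
      simp only
      exact ih _ _

-- the heart of the proof: A's reversed scan equals B's forward fold, for any action list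
theorem pvLoopA_eq_foldB (position : Int) (racts : List String) :
    pvLoopA position racts none = (racts.reverse.foldl (pvStepB position) (0, 0)).1 := by
  induction racts with
  | nil => rfl
  | cons x r ih =>
    simp only [List.reverse_cons, List.foldl_append, List.foldl_cons, List.foldl_nil]
    simp only [pvLoopA, pvStepB]
    cases hp : pvParse x with
    | none => exact ih
    | some t =>
      obtain ⟨p, c, s⟩ := t
      simp only
      by_cases hpp : p = position
      · by_cases hr : c = 'r'
        · simp [hpp, hr]
        · by_cases hc : c = 'c'
          · simp [hpp, hc, pvLoopA_some]
            rw [← List.foldl_reverse, foldl_pvStepB_snd, foldl_pvStepM_reverse]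
          · simp [hpp, hr, hc, ih]
      · simp [hpp, ih]

theorem ports_agree (position : Int) (action_history : List (List String)) :
    get_current_round_bet position action_history = get_current_round_bet_alt position action_history := by
  unfold get_current_round_bet get_current_round_bet_alt
  cases h : PySem.List.pyGet? action_history (-1) with
  | none => rfl
  | some last =>
    simp only
    have := pvLoopA_eq_foldB position
      ((if action_history.length = 1 then "0:r50" :: "1:r100" :: last else last).reverse)
    simpa [List.reverse_reverse] using this

-- ===== VERDICT (by name: the statement is the Claim_ definition above) =====
theorem get_current_round_bet_spec : Claim_equal_get_current_round_bet := by
  intro position action_history _ _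
  exact ports_agree position action_history
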